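-- pv_equiv track=rewrite | github.com/hi-meral/python | Scaler/Day-75/aq-1.py | solve
-- ===== SOURCE A (Python) =====
-- from collections import deque
--
-- class Queue:
--     def __init__(self):
--         self.buffer = deque()
--
--     def enqueue(self, val):
--         self.buffer.append(val)
--
--     def dequeue(self):
--         if len(self.buffer) == 0:
--             return
--
--         return self.buffer.popleft()
--
--     def is_empty(self):
--         return len(self.buffer) == 0
--
--     def front(self):
--         return self.buffer[0]
--
--     def rear(self):
--         return self.buffer[-1]
--
--     def size(self):
--         return len(self.buffer)
--
-- def solve(A):
--
--     q = Queue()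
--     C = 1
--
--     q.enqueue("11")
--     q.enqueue("22")
--
--     while C < A:
--
--         ele = q.dequeue()
--         C += 1
--
--         first_half = ele[:len(ele)//2]
--         second_half = ele[len(ele)//2:]
--
--         newele = first_half + "11" + second_half
--         q.enqueue(newele)
--
--         newele = first_half + "22" + second_half
--         q.enqueue(newele)
--
--     return int(q.front())
-- ===== SOURCE B (Python) =====
-- def solve(A):
--     # A-th string: for n = A+1, the bits of n below its leading bit
--     # (MSB first) name the digits (0 -> '1', 1 -> '2'); the string is
--     # those digits followed by their mirror image.
--     n = A + 1
--     rev = []  # digits, least significant first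
--     while n > 1:
--         rev.append('1' if n % 2 == 0 else '2')
--         n //= 2
--     return int(''.join(reversed(rev)) + ''.join(rev))
-- ===== Notes on version B (the rewrite author's own statement) =====
-- stated objective: faster
-- what changed: Replaces the BFS queue that generates all A strings one by one with a direct O(log A) construction of the A-th string from the binary digits of A+1 (digits below the leading bit name '1'/'2' choices, mirrored for the right half).
-- outside the precondition, e.g. on solve(0): A returns 11, B raises ValueError
import Mathlib
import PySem

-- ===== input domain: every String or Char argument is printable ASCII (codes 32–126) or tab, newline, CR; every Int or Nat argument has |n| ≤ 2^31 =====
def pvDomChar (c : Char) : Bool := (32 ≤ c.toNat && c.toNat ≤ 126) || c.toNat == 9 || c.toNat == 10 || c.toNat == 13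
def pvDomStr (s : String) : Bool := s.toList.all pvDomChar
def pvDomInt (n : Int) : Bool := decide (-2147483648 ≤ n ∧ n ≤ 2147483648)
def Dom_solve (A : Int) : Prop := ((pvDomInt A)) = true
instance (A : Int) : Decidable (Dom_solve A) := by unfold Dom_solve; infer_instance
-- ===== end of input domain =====

-- B replaces A's O(A)-iteration BFS queue generation by a direct O(log A) construction
-- of the A-th string from the binary digits of A+1 (objective: faster, asymptotic).

-- ===== PORT A =====
-- Python strings are ported as List Char (PySem convention); the queue is a List of them.
def solveLoop (A : Int) (q : List (List Char)) (C : Int) : List (List Char) :=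
  if C < A then
    match q with
    | [] => []  -- dequeue of an empty queue (Python returns None, then crashes); unreachable: the queue is never empty
    | ele :: rest =>
        let half : Int := PySem.Int.floordiv (ele.length : Int) 2
        let firstHalf := PySem.List.slice ele none (some half)      -- ele[:len(ele)//2]
        let secondHalf := PySem.List.slice ele (some half) none     -- ele[len(ele)//2:]
        let new1 := firstHalf ++ ['1', '1'] ++ secondHalf
        let new2 := firstHalf ++ ['2', '2'] ++ secondHalf
        solveLoop A (rest ++ [new1, new2]) (C + 1)
  else q
termination_by (A - C).toNat
decreasing_by omega

def solve (A : Int) : Int :=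
  match solveLoop A [['1', '1'], ['2', '2']] 1 with
  | [] => 0                                       -- q.front() on empty queue: unreachable
  | front :: _ => (PySem.Int.ofChars? front).getD 0  -- int(q.front()); the string is always digits, so it parses

-- ===== PORT B =====
-- rev: the digits ('1'/'2') of the answer's left half, least significant first.
def altDigits (n : Int) : List Char :=
  if 1 < n then
    (if PySem.Int.mod n 2 == 0 then '1' else '2') :: altDigits (PySem.Int.floordiv n 2)
  else []
termination_by n.toNat
decreasing_by
  rw [PySem.Int.floordiv_eq_ediv_of_pos (by omega)]
  omega

def solve_alt (A : Int) : Int :=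
  let rev := altDigits (A + 1)
  (PySem.Int.ofChars? (rev.reverse ++ rev)).getD 0  -- int(''.join(reversed(rev)) + ''.join(rev)); always parses on Pre_

-- ===== PRECONDITION & SPEC =====
-- Pre_ restricts to the natural domain A ≥ 1 ("the A-th generated string"): for A ≤ 0 the
-- Python A's loop never runs and it returns the leftover initial front 11, while B's natural
-- construction raises ValueError (int('') on an empty digit list), so those inputs are excluded.
def Pre_solve (A : Int) : Prop := 1 ≤ A
instance (A : Int) : Decidable (Pre_solve A) := by unfold Pre_solve; infer_instance

def pvWitness_solve : Int := (3)

def Spec_solve (A : Int) (out : Int) : Prop := out = solve_alt A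
instance (A : Int) (out : Int) : Decidable (Spec_solve A out) := by unfold Spec_solve; infer_instance

-- ===== CLAIM (what is proved, stated in full; the proofs are below) =====
def Claim_equal_solve : Prop := ∀ (A : Int), Dom_solve A → Pre_solve A → Spec_solve A (solve A)

-- ===== LEMMAS AND PROOFS =====

-- Left half of the string at BFS position i is fdig (i+1): the binary digits of i+1 below
-- the leading bit, most significant first, 0 ↦ '1', 1 ↦ '2'.
def fdig (n : Nat) : List Char :=
  if 1 < n then fdig (n / 2) ++ [if n % 2 == 0 then '1' else '2'] else []

-- The queue element at BFS position i (1-based): left half followed by its mirror image.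
def E (i : Nat) : List Char := fdig (i + 1) ++ (fdig (i + 1)).reverse

theorem altDigits_eq_aux : ∀ (m : Nat) (n : Int), 0 ≤ n → n.toNat = m → altDigits n = (fdig m).reverse := by
  intro m
  induction m using Nat.strong_induction_on with
  | _ m ih =>
    intro n h hm
    rw [altDigits, fdig]
    by_cases h1 : 1 < n
    · have h2 : (0:Int) < 2 := by omega
      rw [if_pos h1, if_pos (by omega : 1 < m),
        PySem.Int.floordiv_eq_ediv_of_pos h2, PySem.Int.mod_eq_emod_of_pos h2]
      have hmod : (n % 2 == 0) = (m % 2 == 0) := by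
        rcases Int.emod_two_eq_zero_or_one n with he | he <;> simp [he] <;> omega
      rw [ih (m / 2) (by omega) (n / 2) (by omega) (by omega)]
      rw [hmod, List.reverse_append]
      simp
    · rw [if_neg h1, if_neg (by omega : ¬ 1 < m)]
      simp

theorem altDigits_eq (n : Int) (h : 0 ≤ n) : altDigits n = (fdig n.toNat).reverse :=
  altDigits_eq_aux n.toNat n h rfl

theorem fdig_double (i : Nat) (h : 1 ≤ i) :
    fdig (2 * i) = fdig i ++ ['1'] ∧ fdig (2 * i + 1) = fdig i ++ ['2'] := by
  constructor
  · rw [fdig]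
    rw [if_pos (by omega : 1 < 2 * i)]
    have : 2 * i / 2 = i := by omega
    simp [this]
  · rw [fdig]
    rw [if_pos (by omega : 1 < 2 * i + 1)]
    have : (2 * i + 1) / 2 = i := by omega
    simp [this]

theorem len_E (i : Nat) : (E i).length = 2 * (fdig (i + 1)).length := by
  simp [E]; omega

-- One loop step: the children of the element at position i are the elements at 2i+1 and 2i+2.
theorem step_children (i : Nat) :
    (PySem.List.slice (E i) none (some (PySem.Int.floordiv ((E i).length : Int) 2)) ++ ['1', '1'] ++
      PySem.List.slice (E i) (some (PySem.Int.floordiv ((E i).length : Int) 2)) none = E (2 * i + 1)) ∧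
    (PySem.List.slice (E i) none (some (PySem.Int.floordiv ((E i).length : Int) 2)) ++ ['2', '2'] ++
      PySem.List.slice (E i) (some (PySem.Int.floordiv ((E i).length : Int) 2)) none = E (2 * i + 2)) := by
  set k := (fdig (i + 1)).length with hk
  have hlen : ((E i).length : Int) = 2 * k := by rw [len_E]; push_cast; ring
  have hhalf : PySem.Int.floordiv ((E i).length : Int) 2 = (k : Int) := by
    rw [hlen, PySem.Int.floordiv_eq_ediv_of_pos (by omega)]; omega
  have htake : PySem.List.slice (E i) none (some (PySem.Int.floordiv ((E i).length : Int) 2))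
      = fdig (i + 1) := by
    rw [hhalf, PySem.List.slice_to_natCast, E, List.take_append_of_le_length (by omega),
      List.take_of_length_le (by omega)]
  have hdrop : PySem.List.slice (E i) (some (PySem.Int.floordiv ((E i).length : Int) 2)) none
      = (fdig (i + 1)).reverse := by
    rw [hhalf, PySem.List.slice_from_natCast, E, List.drop_append_of_le_length (by omega),
      List.drop_of_length_le (by omega)]
    simp
  obtain ⟨h1, h2⟩ := fdig_double (i + 1) (by omega)
  have e1 : 2 * i + 1 + 1 = 2 * (i + 1) := by ring
  have e2 : 2 * i + 2 + 1 = 2 * (i + 1) + 1 := by ring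
  constructor
  · rw [htake, hdrop, E, e1, h1, List.reverse_append]; simp
  · rw [htake, hdrop, E, e2, h2, List.reverse_append]; simp

-- Loop invariant: with C = c and the queue holding the elements at positions c..2c,
-- running the loop leaves the queue holding the elements at positions c'..2c', c' = c + remaining fuel.
theorem loop_inv (fuel : Nat) : ∀ (A C : Int) (c : Nat), 1 ≤ c → C = (c : Int) →
    fuel = (A - C).toNat →
    solveLoop A ((List.range' c (c + 1)).map E) C
      = (List.range' (c + fuel) (c + fuel + 1)).map E := by
  induction fuel with
  | zero =>
    intro A C c hc hC hf
    rw [solveLoop.eq_def, if_neg (by omega : ¬ C < A)]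
    simp
  | succ m ih =>
    intro A C c hc hC hf
    have hq0 : (List.range' c (c + 1)).map E = E c :: (List.range' (c + 1) c).map E := by
      rw [List.range'_succ, List.map_cons]
    rw [hq0, solveLoop.eq_def, if_pos (by omega : C < A)]
    simp only
    obtain ⟨h1, h2⟩ := step_children c
    rw [h1, h2]
    have hq : (List.range' (c + 1) c).map E ++ [E (2 * c + 1), E (2 * c + 2)]
        = (List.range' (c + 1) (c + 1 + 1)).map E := by
      have : List.range' (c + 1) (c + 1 + 1) = List.range' (c + 1) c ++ [2 * c + 1, 2 * c + 2] := by
        rw [show c + 1 + 1 = c + 1 + 1 from rfl, List.range'_concat, List.range'_concat]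
        simp
        constructor <;> omega
      rw [this]
      simp
    rw [hq, ih A (C + 1) (c + 1) (by omega) (by omega) (by omega),
      show c + 1 + m = c + (m + 1) by omega]

theorem solve_closed (A : Int) (h : 1 ≤ A) :
    solve A = (PySem.Int.ofChars? (E A.toNat)).getD 0 := by
  unfold solve
  have h0 : [['1', '1'], ['2', '2']] = (List.range' 1 (1 + 1)).map E := by
    have e1 : E 1 = ['1', '1'] := by
      rw [E, fdig, fdig]; norm_num
    have e2 : E 2 = ['2', '2'] := by
      rw [E, fdig, fdig]; norm_num
    simp [List.range', e1, e2]
  rw [h0, loop_inv ((A - 1).toNat) A 1 1 (by omega) (by omega) (by omega)]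
  have : 1 + (A - 1).toNat = A.toNat := by omega
  rw [this, List.range'_succ, List.map_cons]

theorem solve_alt_closed (A : Int) (h : 1 ≤ A) :
    solve_alt A = (PySem.Int.ofChars? (E A.toNat)).getD 0 := by
  unfold solve_alt
  rw [altDigits_eq (A + 1) (by omega)]
  have : (A + 1).toNat = A.toNat + 1 := by omega
  rw [this]
  simp [E]

-- ===== VERDICT (by name: the statement is the Claim_ definition above) =====
theorem solve_spec : Claim_equal_solve := by
  intro A _ hpre
  unfold Spec_solve
  rw [solve_closed A hpre, solve_alt_closed A hpre]
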